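-- pv_equiv track=rewrite | github.com/Pulkinen/ClayMon | replicate.py | select_oldest_files_adjust_size_to
-- ===== SOURCE A (Python) =====
-- def select_oldest_files_adjust_size_to(file_list, size_to_delete):
--     del_list = [fl for fl in file_list if not 'stat' in fl[0].lower()]
--     srtd_files = sorted(del_list, key=lambda itm: itm[2])
--     accum_size = 0
--     todelete = []
--     for itm in srtd_files:
--         accum_size += itm[1]
--         todelete.append(itm)
--         if accum_size > size_to_delete:
--             break
--     return todelete
-- ===== SOURCE B (Python) =====
-- def _meld(a, b):
--     # meld two root pairing heaps (sibling slot of a root is always None)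
--     if a is None:
--         return b
--     if b is None:
--         return a
--     ka, va, ca, _ = a
--     kb, vb, cb, _ = b
--     if ka <= kb:
--         return (ka, va, (kb, vb, cb, ca), None)
--     return (kb, vb, (ka, va, ca, cb), None)
--
--
-- def _delete_min(h):
--     # h is a non-empty root; merge its child chain: pair up left-to-right,
--     # then meld the pairs from right to left
--     _, _, c, _ = h
--     pairs = []
--     cur = c
--     while cur is not None:
--         k1, v1, c1, nxt = cur
--         first = (k1, v1, c1, None)
--         if nxt is None:
--             pairs.append(first)
--             break
--         k2, v2, c2, nxt2 = nxt
--         pairs.append(_meld(first, (k2, v2, c2, None)))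
--         cur = nxt2
--     acc = None
--     for x in reversed(pairs):
--         acc = _meld(acc, x)
--     return acc
--
--
-- def select_oldest_files_adjust_size_to(file_list, size_to_delete):
--     # pairing-heap partial selection: no sort; pop oldest (timestamp, with the
--     # original position as tie-break, matching a stable order) while the
--     # remaining budget has not gone negative
--     heap = None
--     idx = 0
--     for fl in file_list:
--         if 'stat' not in fl[0].lower():
--             heap = _meld(heap, ((fl[2], idx), fl, None, None))
--             idx += 1
--     out = []
--     budget = size_to_delete
--     while heap is not None:
--         itm = heap[1]
--         heap = _delete_min(heap)
--         out.append(itm)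
--         budget -= itm[1]
--         if budget < 0:
--             break
--     return out
-- ===== Notes on version B (the rewrite author's own statement) =====
-- stated objective: alternative
-- what changed: A sorts the whole list and walks it with an accumulate-and-break loop; B never sorts: it pushes the filtered files onto a pairing heap keyed by (timestamp, arrival index) and pops minima one at a time while the remaining budget is nonnegative, so only the selected prefix is ever ordered.
import Mathlib
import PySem

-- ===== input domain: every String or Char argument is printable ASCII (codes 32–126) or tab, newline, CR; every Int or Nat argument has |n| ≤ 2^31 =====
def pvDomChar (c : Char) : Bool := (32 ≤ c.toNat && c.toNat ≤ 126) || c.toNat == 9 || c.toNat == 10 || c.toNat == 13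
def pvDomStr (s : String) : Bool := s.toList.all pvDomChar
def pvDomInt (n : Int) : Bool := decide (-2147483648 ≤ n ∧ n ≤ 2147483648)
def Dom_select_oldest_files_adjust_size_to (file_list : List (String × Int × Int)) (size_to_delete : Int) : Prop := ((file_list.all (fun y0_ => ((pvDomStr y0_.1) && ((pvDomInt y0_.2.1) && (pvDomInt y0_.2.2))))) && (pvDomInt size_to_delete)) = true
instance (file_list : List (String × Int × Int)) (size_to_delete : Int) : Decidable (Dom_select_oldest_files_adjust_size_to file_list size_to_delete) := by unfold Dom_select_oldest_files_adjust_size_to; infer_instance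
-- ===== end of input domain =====

-- B replaces A's sort-then-accumulate loop by a pairing heap: files are pushed onto a
-- min-heap keyed by (timestamp, arrival index) and popped one at a time while the
-- remaining budget is nonnegative (partial selection, no sort call).

-- ===== PORT A =====
-- the for-loop with break: acc is accum_size, list is the remaining srtd_files
def pvALoop (size_to_delete : Int) : Int → List (String × Int × Int) → List (String × Int × Int)
  | _, [] => []
  | acc, itm :: rest =>
      let acc' := acc + itm.2.1
      if acc' > size_to_delete then [itm] else itm :: pvALoop size_to_delete acc' rest

def select_oldest_files_adjust_size_to (file_list : List (String × Int × Int)) (size_to_delete : Int) : List (String × Int × Int) :=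
  let del_list := file_list.filter (fun fl => !(PySem.Str.isIn "stat" (PySem.Str.lower fl.1)))
  let srtd_files := PySem.List.sorted del_list (fun itm => itm.2.2)
  pvALoop size_to_delete 0 srtd_files

-- ===== PORT B =====
-- pairing heap in leftmost-child / right-sibling form (Source B's 4-tuples; nil = None)
inductive PH : Type
  | nil : PH
  | node : (Int × Int) → (String × Int × Int) → PH → PH → PH
deriving DecidableEq, Repr

-- Python tuple comparison ka <= kb on the (timestamp, index) keys
def pvKle (a b : Int × Int) : Bool := a.1 < b.1 || (a.1 == b.1 && a.2 ≤ b.2)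

-- Source B's _meld
def pvMeld : PH → PH → PH
  | PH.nil, b => b
  | a, PH.nil => a
  | PH.node ka va ca _, PH.node kb vb cb _ =>
      if pvKle ka kb then PH.node ka va (PH.node kb vb cb ca) PH.nil
      else PH.node kb vb (PH.node ka va ca cb) PH.nil

def pvSize : PH → Nat
  | PH.nil => 0
  | PH.node _ _ c s => 1 + pvSize c + pvSize s

lemma pvSize_meld_le (a b : PH) : pvSize (pvMeld a b) ≤ pvSize a + pvSize b := by
  cases a <;> cases b <;> simp [pvMeld, pvSize] <;> split <;> simp [pvSize] <;> omega

-- Source B's first while loop in _delete_min: pair up the child chain left to right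
def pvFirstPass : PH → List PH
  | PH.nil => []
  | PH.node k1 v1 c1 PH.nil => [PH.node k1 v1 c1 PH.nil]
  | PH.node k1 v1 c1 (PH.node k2 v2 c2 nxt2) =>
      pvMeld (PH.node k1 v1 c1 PH.nil) (PH.node k2 v2 c2 PH.nil) :: pvFirstPass nxt2

lemma pvSize_firstPass_le (c : PH) : ((pvFirstPass c).map pvSize).sum ≤ pvSize c := by
  fun_induction pvFirstPass c with
  | case1 => simp
  | case2 k1 v1 c1 => simp [pvSize]
  | case3 k1 v1 c1 k2 v2 c2 nxt2 ih =>
      have h := pvSize_meld_le (PH.node k1 v1 c1 PH.nil) (PH.node k2 v2 c2 PH.nil)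
      simp [pvSize] at h ⊢
      omega

lemma pvSize_foldl_meld_le (l : List PH) (acc : PH) :
    pvSize (l.foldl pvMeld acc) ≤ pvSize acc + (l.map pvSize).sum := by
  induction l generalizing acc with
  | nil => simp
  | cons x xs ih =>
      have h := pvSize_meld_le acc x
      have h2 := ih (pvMeld acc x)
      simp only [List.foldl_cons, List.map_cons, List.sum_cons]
      omega

-- Source B's _delete_min applied to the child chain: reversed fold of the pairs
def pvDelMinChain (c : PH) : PH := ((pvFirstPass c).reverse).foldl pvMeld PH.nil

lemma pvSize_delMinChain_le (c : PH) : pvSize (pvDelMinChain c) ≤ pvSize c := by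
  have h := pvSize_foldl_meld_le (pvFirstPass c).reverse PH.nil
  rw [List.map_reverse, List.sum_reverse] at h
  have h2 := pvSize_firstPass_le c
  have h0 : pvSize PH.nil = 0 := rfl
  unfold pvDelMinChain
  omega

-- Source B's main while loop: pop the min, append, shrink the budget, stop when negative
def pvPopLoop (budget : Int) : PH → List (String × Int × Int)
  | PH.nil => []
  | PH.node _ v c _ =>
      let b' := budget - v.2.1
      if b' < 0 then [v] else v :: pvPopLoop b' (pvDelMinChain c)
termination_by h => pvSize h
decreasing_by
  have := pvSize_delMinChain_le c
  simp [pvSize]; omega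

def select_oldest_files_adjust_size_to_alt (file_list : List (String × Int × Int)) (size_to_delete : Int) : List (String × Int × Int) :=
  let st := file_list.foldl
    (fun (st : PH × Int) fl =>
      if !(PySem.Str.isIn "stat" (PySem.Str.lower fl.1)) then
        (pvMeld st.1 (PH.node (fl.2.2, st.2) fl PH.nil PH.nil), st.2 + 1)
      else st)
    (PH.nil, 0)
  pvPopLoop size_to_delete st.1

-- ===== PRECONDITION & SPEC =====
def Spec_select_oldest_files_adjust_size_to (file_list : List (String × Int × Int)) (size_to_delete : Int) (out : List (String × Int × Int)) : Prop := out = select_oldest_files_adjust_size_to_alt file_list size_to_delete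
instance (file_list : List (String × Int × Int)) (size_to_delete : Int) (out : List (String × Int × Int)) : Decidable (Spec_select_oldest_files_adjust_size_to file_list size_to_delete out) := by unfold Spec_select_oldest_files_adjust_size_to; infer_instance

-- ===== CLAIM (what is proved, stated in full; the proofs are below) =====
def Claim_equal_select_oldest_files_adjust_size_to : Prop := ∀ (file_list : List (String × Int × Int)) (size_to_delete : Int), Dom_select_oldest_files_adjust_size_to file_list size_to_delete → Spec_select_oldest_files_adjust_size_to file_list size_to_delete (select_oldest_files_adjust_size_to file_list size_to_delete)

-- ===== LEMMAS AND PROOFS =====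

-- the multiset of (key, item) pairs stored in a heap (child chain and sibling chain)
def pvElems : PH → List ((Int × Int) × (String × Int × Int))
  | PH.nil => []
  | PH.node k v c s => (k, v) :: (pvElems c ++ pvElems s)

-- lexicographic ≤ / < on keys, as Props
def pvLexLe (a b : Int × Int) : Prop := a.1 < b.1 ∨ (a.1 = b.1 ∧ a.2 ≤ b.2)

lemma pvKle_iff (a b : Int × Int) : pvKle a b = true ↔ pvLexLe a b := by
  simp [pvKle, pvLexLe]

lemma pvLexLe_total (a b : Int × Int) : ¬ pvLexLe a b → pvLexLe b a := by
  unfold pvLexLe; omega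

lemma pvLexLe_trans {a b c : Int × Int} : pvLexLe a b → pvLexLe b c → pvLexLe a c := by
  unfold pvLexLe; omega

-- a root heap has no sibling
def pvRoot : PH → Prop
  | PH.nil => True
  | PH.node _ _ _ s => s = PH.nil

-- heap order: every node's key is ≤ all keys in its child subtree (recursively)
def pvWf : PH → Prop
  | PH.nil => True
  | PH.node k _ c s => (∀ e ∈ pvElems c, pvLexLe k e.1) ∧ pvWf c ∧ pvWf s

lemma pvMeld_elems_perm (a b : PH) (ha : pvRoot a) (hb : pvRoot b) :
    (pvElems (pvMeld a b)).Perm (pvElems a ++ pvElems b) := by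
  cases a with
  | nil => simp [pvMeld, pvElems]
  | node ka va ca sa =>
    cases b with
    | nil => simp [pvMeld, pvElems]
    | node kb vb cb sb =>
      have hsa : sa = PH.nil := ha
      have hsb : sb = PH.nil := hb
      subst hsa; subst hsb
      simp only [pvMeld]
      split_ifs
      · simp only [pvElems, List.append_nil]
        exact List.Perm.cons _ ((List.perm_append_comm.cons _).trans List.perm_middle.symm)
      · simp only [pvElems, List.append_nil]
        exact (List.Perm.swap _ _ _).trans (List.Perm.cons _ List.perm_middle.symm)

lemma pvMeld_wf (a b : PH) (ha : pvRoot a) (hb : pvRoot b) (wa : pvWf a) (wb : pvWf b) :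
    pvWf (pvMeld a b) ∧ pvRoot (pvMeld a b) := by
  cases a with
  | nil => simpa [pvMeld] using ⟨wb, hb⟩
  | node ka va ca sa =>
    cases b with
    | nil => simpa [pvMeld] using ⟨wa, ha⟩
    | node kb vb cb sb =>
      have hsa : sa = PH.nil := ha
      have hsb : sb = PH.nil := hb
      subst hsa; subst hsb
      obtain ⟨hka, wca, -⟩ := wa
      obtain ⟨hkb, wcb, -⟩ := wb
      simp only [pvMeld]
      split_ifs with hle
      · refine ⟨⟨?_, ⟨hkb, wcb, wca⟩, trivial⟩, rfl⟩
        intro e he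
        simp only [pvElems, List.mem_cons, List.mem_append] at he
        rcases he with h | h | h
        · subst h; exact (pvKle_iff _ _).mp hle
        · exact pvLexLe_trans ((pvKle_iff _ _).mp hle) (hkb e h)
        · exact hka e h
      · have hba : pvLexLe kb ka := pvLexLe_total _ _ (fun h => hle ((pvKle_iff _ _).mpr h))
        refine ⟨⟨?_, ⟨hka, wca, wcb⟩, trivial⟩, rfl⟩
        intro e he
        simp only [pvElems, List.mem_cons, List.mem_append] at he
        rcases he with h | h | h
        · subst h; exact hba
        · exact pvLexLe_trans hba (hka e h)
        · exact hkb e h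

lemma pvFirstPass_wf (c : PH) (hc : pvWf c) :
    ∀ x ∈ pvFirstPass c, pvWf x ∧ pvRoot x := by
  fun_induction pvFirstPass c with
  | case1 => simp
  | case2 k1 v1 c1 =>
      intro x hx
      simp only [pvFirstPass, List.mem_singleton] at hx
      subst hx
      exact ⟨hc, rfl⟩
  | case3 k1 v1 c1 k2 v2 c2 nxt2 ih =>
      obtain ⟨h1, w1, h2, w2, wn⟩ := hc
      intro x hx
      simp only [pvFirstPass, List.mem_cons] at hx
      rcases hx with h | h
      · subst h
        exact pvMeld_wf _ _ rfl rfl ⟨h1, w1, trivial⟩ ⟨h2, w2, trivial⟩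
      · exact ih wn x h

lemma pvFirstPass_elems (c : PH) :
    (((pvFirstPass c).map pvElems).flatten).Perm (pvElems c) := by
  fun_induction pvFirstPass c with
  | case1 => simp [pvElems]
  | case2 k1 v1 c1 => simp [pvElems]
  | case3 k1 v1 c1 k2 v2 c2 nxt2 ih =>
      simp only [List.map_cons, List.flatten_cons]
      have hm := pvMeld_elems_perm (PH.node k1 v1 c1 PH.nil) (PH.node k2 v2 c2 PH.nil) rfl rfl
      refine (hm.append ih).trans (List.Perm.of_eq ?_)
      simp [pvElems]

lemma pvFoldlMeld_wf_perm (l : List PH) (hl : ∀ x ∈ l, pvWf x ∧ pvRoot x) (acc : PH)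
    (wacc : pvWf acc) (racc : pvRoot acc) :
    pvWf (l.foldl pvMeld acc) ∧ pvRoot (l.foldl pvMeld acc) ∧
      (pvElems (l.foldl pvMeld acc)).Perm (pvElems acc ++ (l.map pvElems).flatten) := by
  induction l generalizing acc with
  | nil => simpa using ⟨wacc, racc⟩
  | cons x xs ih =>
      obtain ⟨wx, rx⟩ := hl x (List.mem_cons_self ..)
      obtain ⟨wm, rm⟩ := pvMeld_wf acc x racc rx wacc wx
      obtain ⟨w', r', p'⟩ := ih (fun y hy => hl y (List.mem_cons_of_mem _ hy)) (pvMeld acc x) wm rm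
      refine ⟨w', r', ?_⟩
      have h2 := (pvMeld_elems_perm acc x racc rx).append_right ((xs.map pvElems).flatten)
      refine (p'.trans h2).trans (List.Perm.of_eq ?_)
      simp

lemma pvDelMinChain_spec (c : PH) (hc : pvWf c) :
    pvWf (pvDelMinChain c) ∧ pvRoot (pvDelMinChain c) ∧
      (pvElems (pvDelMinChain c)).Perm (pvElems c) := by
  have hl : ∀ x ∈ (pvFirstPass c).reverse, pvWf x ∧ pvRoot x := by
    intro x hx; exact pvFirstPass_wf c hc x (List.mem_reverse.mp hx)
  obtain ⟨w, r, p⟩ := pvFoldlMeld_wf_perm (pvFirstPass c).reverse hl PH.nil trivial trivial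
  refine ⟨w, r, ?_⟩
  have e1 : pvElems PH.nil ++ (((pvFirstPass c).reverse).map pvElems).flatten
      = (((pvFirstPass c).map pvElems).reverse).flatten := by simp [pvElems]
  have p2 := (((pvFirstPass c).map pvElems).reverse_perm).flatten
  exact ((p.trans (List.Perm.of_eq e1)).trans p2).trans (pvFirstPass_elems c)

-- proof-side: the full pop sequence of a heap
def pvPopAll : PH → List ((Int × Int) × (String × Int × Int))
  | PH.nil => []
  | PH.node k v c _ => (k, v) :: pvPopAll (pvDelMinChain c)
termination_by h => pvSize h
decreasing_by
  have := pvSize_delMinChain_le c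
  simp [pvSize]; omega

lemma pvPopAll_spec (h : PH) (wh : pvWf h) (rh : pvRoot h) :
    (pvPopAll h).Perm (pvElems h) ∧ (pvPopAll h).Pairwise (fun a b => pvLexLe a.1 b.1) := by
  induction h using pvPopAll.induct with
  | case1 => simp [pvPopAll, pvElems]
  | case2 k v c s ih =>
      have hs : s = PH.nil := rh
      subst hs
      obtain ⟨hk, wc, -⟩ := wh
      obtain ⟨wd, rd, pd⟩ := pvDelMinChain_spec c wc
      obtain ⟨ihp, ihs⟩ := ih wd rd
      constructor
      · simp only [pvPopAll, pvElems, List.append_nil]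
        exact ihp.trans pd |>.cons _
      · simp only [pvPopAll]
        refine List.Pairwise.cons ?_ ihs
        intro e he
        have : e ∈ pvElems c := pd.subset (ihp.subset he)
        exact hk e this

-- budget walk over a plain list (the common shape of both break-loops)
def pvBudget (budget : Int) : List (String × Int × Int) → List (String × Int × Int)
  | [] => []
  | x :: xs =>
      let b' := budget - x.2.1
      if b' < 0 then [x] else x :: pvBudget b' xs

lemma pvPopLoop_eq_budget (h : PH) : ∀ b : Int,
    pvPopLoop b h = pvBudget b ((pvPopAll h).map (·.2)) := by
  induction h using pvPopAll.induct with
  | case1 => intro b; simp [pvPopLoop, pvPopAll, pvBudget]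
  | case2 k v c s ih =>
      intro b
      simp only [pvPopLoop, pvPopAll, List.map_cons, pvBudget]
      by_cases hb : b - v.2.1 < 0
      · simp [hb]
      · simp [hb, ih]

lemma pvALoop_eq_budget (s : Int) (l : List (String × Int × Int)) : ∀ acc,
    pvALoop s acc l = pvBudget (s - acc) l := by
  induction l with
  | nil => intro acc; simp [pvALoop, pvBudget]
  | cons x xs ih =>
      intro acc
      by_cases hbr : acc + x.2.1 > s
      · simp [pvALoop, pvBudget, hbr, show s - acc - x.2.1 < 0 by omega]
      · simp [pvALoop, pvBudget, hbr, show ¬(s - acc - x.2.1 < 0) by omega, ih (acc + x.2.1),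
              show s - (acc + x.2.1) = s - acc - x.2.1 by ring]

-- the decorated list: (key = (timestamp, arrival index), item)
def pvDecor (items : List (String × Int × Int)) (n : Nat) : List ((Int × Int) × (String × Int × Int)) :=
  (items.zipIdx n).map (fun xi => ((xi.1.2.2, (xi.2 : Int)), xi.1))

-- B's build fold = pushing the decorated filtered list one by one
lemma pvBuild_eq (fl : List (String × Int × Int)) : ∀ (h : PH) (n : Nat),
    fl.foldl
      (fun (st : PH × Int) fl =>
        if !(PySem.Str.isIn "stat" (PySem.Str.lower fl.1)) then
          (pvMeld st.1 (PH.node (fl.2.2, st.2) fl PH.nil PH.nil), st.2 + 1)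
        else st)
      (h, (n : Int))
    = ((pvDecor (fl.filter (fun f => !(PySem.Str.isIn "stat" (PySem.Str.lower f.1)))) n).foldl
        (fun hh e => pvMeld hh (PH.node e.1 e.2 PH.nil PH.nil)) h,
       ((n + (fl.filter (fun f => !(PySem.Str.isIn "stat" (PySem.Str.lower f.1)))).length : Nat) : Int)) := by
  induction fl with
  | nil => simp [pvDecor]
  | cons x xs ih =>
      intro h n
      by_cases hx : PySem.Str.isIn "stat" (PySem.Str.lower x.1)
      all_goals simp at hx
      · simp only [List.foldl_cons, List.filter_cons]
        simpa [hx] using ih h n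
      · have hb : (!PySem.Str.isIn "stat" (PySem.Str.lower x.1)) = true := by simp [hx]
        have hcast : ((n : Int) + 1) = ((n + 1 : Nat) : Int) := by push_cast; ring
        simp only [List.foldl_cons, List.filter_cons]
        rw [if_pos hb, if_pos hb, hcast, ih]
        simp only [pvDecor, List.zipIdx_cons, List.map_cons, List.foldl_cons, List.length_cons,
          Prod.mk.injEq]
        exact ⟨trivial, by push_cast; ring⟩

-- insertion with the lex (key, index) order projects to insertion with the key order,
-- as long as the new element's index is larger than every index already present
lemma pvInsertBy_proj (x : String × Int × Int) (n : Int) :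
    ∀ (acc : List ((Int × Int) × (String × Int × Int))),
      (∀ e ∈ acc, e.1.2 < n ∧ e.1.1 = e.2.2.2) →
      (PySem.List.insertBy (fun a b => decide ((toLex a.1 : Int ×ₗ Int) < toLex b.1))
          ((x.2.2, n), x) acc).map (·.2)
        = PySem.List.insertBy (fun a b => decide (a.2.2 < b.2.2)) x (acc.map (·.2)) := by
  intro acc
  induction acc with
  | nil => intro _; rfl
  | cons y ys ih =>
      intro hinv
      obtain ⟨hyn, hyk⟩ := hinv y (List.mem_cons_self ..)
      have hcond : (decide ((toLex ((x.2.2, n), x).1 : Int ×ₗ Int) < toLex y.1))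
          = decide (x.2.2 < y.2.2.2) := by
        by_cases hlt : x.2.2 < y.2.2.2
        · simp only [decide_eq_true_eq, hlt, decide_true]
          rw [Prod.Lex.lt_iff]
          simp only [ofLex_toLex]
          left; omega
        · simp only [hlt, decide_false, decide_eq_false_iff_not]
          rw [Prod.Lex.lt_iff]
          simp only [ofLex_toLex]
          push_neg
          constructor
          · omega
          · intro h; omega
      simp only [PySem.List.insertBy, List.map_cons, hcond]
      by_cases hlt : x.2.2 < y.2.2.2
      · simp [hlt]
      · simp only [hlt, decide_false, Bool.false_eq_true, if_false, List.map_cons,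
          List.cons.injEq, true_and]
        exact ih (fun e he => hinv e (List.mem_cons_of_mem _ he))

lemma pvStable_fold (items : List (String × Int × Int)) : ∀ (n : Nat)
    (accd : List ((Int × Int) × (String × Int × Int))),
    (∀ e ∈ accd, e.1.2 < (n : Int) ∧ e.1.1 = e.2.2.2) →
    ((pvDecor items n).foldl
        (fun acc x => PySem.List.insertBy
          (fun a b => decide ((toLex a.1 : Int ×ₗ Int) < toLex b.1)) x acc) accd).map (·.2)
      = items.foldl
          (fun acc x => PySem.List.insertBy (fun a b => decide (a.2.2 < b.2.2)) x acc)
          (accd.map (·.2)) := by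
  induction items with
  | nil => intro n accd _; simp [pvDecor]
  | cons x xs ih =>
      intro n accd hinv
      have hdec : pvDecor (x :: xs) n = ((x.2.2, (n : Int)), x) :: pvDecor xs (n + 1) := by
        simp [pvDecor, List.zipIdx_cons]
      rw [hdec]
      simp only [List.foldl_cons]
      have hinv' : ∀ e ∈ PySem.List.insertBy
          (fun a b => decide ((toLex a.1 : Int ×ₗ Int) < toLex b.1)) ((x.2.2, (n : Int)), x) accd,
          e.1.2 < ((n + 1 : Nat) : Int) ∧ e.1.1 = e.2.2.2 := by
        intro e he
        rcases (PySem.List.mem_insertBy ..).mp he with h | h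
        · subst h; constructor
          · push_cast; omega
          · rfl
        · obtain ⟨h1, h2⟩ := hinv e h
          refine ⟨?_, h2⟩
          push_cast at h1 ⊢; omega
      rw [ih (n + 1) _ hinv', pvInsertBy_proj x (n : Int) accd hinv]

-- stability: lex-sorting the decorated list and projecting is Python's stable sort
lemma pvStable (items : List (String × Int × Int)) :
    ((PySem.List.sorted (pvDecor items 0) (fun e => (toLex e.1 : Int ×ₗ Int)) false).map (·.2))
      = PySem.List.sorted items (fun itm => itm.2.2) false := by
  rw [PySem.List.sorted_eq_foldl_insertBy, PySem.List.sorted_eq_foldl_insertBy]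
  simpa using pvStable_fold items 0 [] (by simp)

lemma pvFlatten_map_singleton (d : List ((Int × Int) × (String × Int × Int))) :
    ((d.map (fun e => PH.node e.1 e.2 PH.nil PH.nil)).map pvElems).flatten = d := by
  induction d with
  | nil => rfl
  | cons e es ih =>
      simp only [List.map_cons, List.flatten_cons, ih]
      simp [pvElems]

lemma pvDecor_idx_lb (items : List (String × Int × Int)) : ∀ (n : Nat),
    ∀ e ∈ pvDecor items n, (n : Int) ≤ e.1.2 := by
  induction items with
  | nil => intro n e he; simp [pvDecor] at he
  | cons x xs ih =>
      intro n e he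
      rw [show pvDecor (x :: xs) n = ((x.2.2, (n : Int)), x) :: pvDecor xs (n + 1) by
        simp [pvDecor, List.zipIdx_cons]] at he
      rcases List.mem_cons.mp he with h | h
      · subst h; simp
      · have := ih (n + 1) e h
        push_cast at this ⊢; omega

lemma pvDecor_idx_pairwise (items : List (String × Int × Int)) : ∀ (n : Nat),
    (pvDecor items n).Pairwise (fun a b => a.1.2 < b.1.2) := by
  induction items with
  | nil => intro n; simp [pvDecor]
  | cons x xs ih =>
      intro n
      rw [show pvDecor (x :: xs) n = ((x.2.2, (n : Int)), x) :: pvDecor xs (n + 1) by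
        simp [pvDecor, List.zipIdx_cons]]
      refine List.Pairwise.cons ?_ (ih (n + 1))
      intro e he
      have := pvDecor_idx_lb xs (n + 1) e he
      push_cast at this ⊢; omega

lemma pvHeapSort (items : List (String × Int × Int)) :
    (pvPopAll ((pvDecor items 0).foldl (fun hh e => pvMeld hh (PH.node e.1 e.2 PH.nil PH.nil)) PH.nil)).map (·.2)
      = PySem.List.sorted items (fun itm => itm.2.2) false := by
  set d := pvDecor items 0 with hd
  set bh := d.foldl (fun hh e => pvMeld hh (PH.node e.1 e.2 PH.nil PH.nil)) PH.nil with hbh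
  have hfold : bh = (d.map (fun e => PH.node e.1 e.2 PH.nil PH.nil)).foldl pvMeld PH.nil := by
    rw [List.foldl_map]
  have hsingle : ∀ x ∈ d.map (fun e => PH.node e.1 e.2 PH.nil PH.nil), pvWf x ∧ pvRoot x := by
    intro x hx
    obtain ⟨e, -, rfl⟩ := List.mem_map.mp hx
    exact ⟨⟨by simp [pvElems], trivial, trivial⟩, rfl⟩
  obtain ⟨wb, rb, pb⟩ := pvFoldlMeld_wf_perm _ hsingle PH.nil trivial trivial
  rw [← hfold] at wb rb pb
  have pbd : (pvElems bh).Perm d := by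
    refine pb.trans (List.Perm.of_eq ?_)
    simpa [pvElems] using pvFlatten_map_singleton d
  obtain ⟨pp, ple⟩ := pvPopAll_spec bh wb rb
  have ppd : (pvPopAll bh).Perm d := pp.trans pbd
  -- indices in the pop sequence are pairwise distinct
  have hne : (pvPopAll bh).Pairwise (fun a b => a.1.2 ≠ b.1.2) := by
    have hdp : d.Pairwise (fun a b => a.1.2 ≠ b.1.2) :=
      (pvDecor_idx_pairwise items 0).imp (fun h => by omega)
    have hsym : Symmetric (fun (a b : (Int × Int) × (String × Int × Int)) => a.1.2 ≠ b.1.2) :=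
      fun a b h => h.symm
    exact (ppd.pairwise_iff fun {a b} hab => hsym hab).mpr hdp
  have hlt : (pvPopAll bh).Pairwise
      (fun a b => (toLex a.1 : Int ×ₗ Int) < toLex b.1) := by
    refine (ple.and hne).imp ?_
    rintro a b ⟨hle, hne'⟩
    rw [Prod.Lex.lt_iff]
    simp only [ofLex_toLex]
    unfold pvLexLe at hle
    omega
  have hsorted : PySem.List.sorted d (fun e => (toLex e.1 : Int ×ₗ Int)) false = pvPopAll bh :=
    PySem.List.sorted_eq_of_perm_of_pairwise_lt _ _ _ ppd hlt
  rw [← pvStable items, ← hd, hsorted]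

-- ===== VERDICT (by name: the statement is the Claim_ definition above) =====
theorem select_oldest_files_adjust_size_to_spec : Claim_equal_select_oldest_files_adjust_size_to := by
  intro file_list size_to_delete _
  unfold Spec_select_oldest_files_adjust_size_to select_oldest_files_adjust_size_to select_oldest_files_adjust_size_to_alt
  simp only []
  rw [show ((PH.nil, 0) : PH × Int) = (PH.nil, ((0 : Nat) : Int)) by norm_num,
      pvBuild_eq, pvALoop_eq_budget, pvPopLoop_eq_budget, pvHeapSort]
  norm_num
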